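-- pv_equiv track=rewrite | github.com/chongwei730/nanoGPT | scripts/render_experiment_table.py | collect_body_methods
-- ===== SOURCE A (Python) =====
-- def collect_body_methods(entries, linesearch_label, explicit_methods):
--     if explicit_methods:
--         return explicit_methods
--     preferred = ["cosine", "muon", "schedulefree_adam"]
--     methods = []
--     for entry in entries:
--         method = entry["method"]
--         if method == linesearch_label:
--             continue
--         if method not in methods:
--             methods.append(method)
--     methods.sort(key=lambda method: (preferred.index(method) if method in preferred else len(preferred), method))
--     return methods
-- ===== SOURCE B (Python) =====
-- def collect_body_methods(entries, linesearch_label, explicit_methods):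
--     if explicit_methods:
--         return explicit_methods
--     preferred = ["cosine", "muon", "schedulefree_adam"]
--     seen = {e["method"] for e in entries} - {linesearch_label}
--     return [p for p in preferred if p in seen] + sorted(seen - set(preferred))
-- ===== Notes on version B (the rewrite author's own statement) =====
-- stated objective: simpler
-- what changed: Instead of deduplicating into an ordered list and sorting it under a (preferred-index, name) tuple key, B builds the method set with a set comprehension and two set differences, then emits the preferred members in the fixed preferred order followed by the remaining members sorted alphabetically.
import Mathlib
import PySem

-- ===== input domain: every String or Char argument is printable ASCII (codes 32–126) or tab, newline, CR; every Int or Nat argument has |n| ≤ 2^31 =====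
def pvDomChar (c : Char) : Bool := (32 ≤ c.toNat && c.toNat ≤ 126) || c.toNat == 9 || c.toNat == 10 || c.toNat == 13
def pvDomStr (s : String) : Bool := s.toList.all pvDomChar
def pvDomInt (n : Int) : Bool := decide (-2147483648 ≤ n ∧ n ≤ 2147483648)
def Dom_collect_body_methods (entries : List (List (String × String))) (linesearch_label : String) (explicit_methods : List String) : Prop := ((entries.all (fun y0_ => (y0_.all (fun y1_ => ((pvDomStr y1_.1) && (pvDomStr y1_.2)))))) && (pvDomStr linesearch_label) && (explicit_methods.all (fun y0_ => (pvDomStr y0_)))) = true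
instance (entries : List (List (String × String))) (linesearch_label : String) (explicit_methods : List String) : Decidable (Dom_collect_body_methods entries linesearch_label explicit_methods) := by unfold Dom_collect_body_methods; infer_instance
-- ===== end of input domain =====

-- B builds the method set with a set comprehension and two set differences, then emits preferred
-- members in the fixed preferred order followed by the rest sorted alphabetically, instead of A's
-- dedup-list plus a sort under a (preferred-index, name) tuple key: simpler decomposition.

-- ===== PORT A =====
-- entry["method"]: none = KeyError, excluded by Pre_; .getD "" is never taken under Pre_.
def collect_body_methods (entries : List (List (String × String))) (linesearch_label : String) (explicit_methods : List String) : List String :=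
  if explicit_methods ≠ [] then explicit_methods
  else
    let preferred : List String := ["cosine", "muon", "schedulefree_adam"]
    let methods : List String := entries.foldl (fun methods entry =>
      let method := ((PySem.Dict.mk entry).get? "method").getD ""
      if method == linesearch_label then methods
      else if methods.contains method then methods
      else methods ++ [method]) []
    PySem.List.sorted2 methods
      (fun method => if preferred.contains method then (PySem.List.index? preferred method).getD 3 else 3)
      (fun method => method)

-- ===== PORT B =====
def collect_body_methods_alt (entries : List (List (String × String))) (linesearch_label : String) (explicit_methods : List String) : List String :=
  match explicit_methods with
  | _ :: _ => explicit_methods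
  | [] =>
    let preferred : List String := ["cosine", "muon", "schedulefree_adam"]
    -- {e["method"] for e in entries} - {linesearch_label}
    let seen : PySem.Set String :=
      PySem.Set.diff
        (PySem.Set.ofList (entries.map (fun e => ((PySem.Dict.mk e).get? "method").getD "")))
        (PySem.Set.ofList [linesearch_label])
    -- [p for p in preferred if p in seen] + sorted(seen - set(preferred))
    preferred.filter (fun p => PySem.Set.contains seen p) ++
      PySem.List.sorted (PySem.Set.diff seen (PySem.Set.ofList preferred)) (fun m => m) false

-- ===== PRECONDITION & SPEC =====
-- Pre_ excludes exactly the inputs where entry["method"] raises KeyError (an entry without a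
-- "method" key, reached only when explicit_methods is empty).
def Pre_collect_body_methods (entries : List (List (String × String))) (linesearch_label : String) (explicit_methods : List String) : Prop :=
  explicit_methods ≠ [] ∨ ∀ e ∈ entries, (PySem.Dict.mk e).contains "method" = true
instance (entries : List (List (String × String))) (linesearch_label : String) (explicit_methods : List String) : Decidable (Pre_collect_body_methods entries linesearch_label explicit_methods) := by unfold Pre_collect_body_methods; infer_instance
def pvWitness_collect_body_methods : (List (List (String × String))) × String × List String :=
  ([[("method", "sgd")], [("method", "muon")]], "ls", [])

def Spec_collect_body_methods (entries : List (List (String × String))) (linesearch_label : String) (explicit_methods : List String) (out : List String) : Prop := out = collect_body_methods_alt entries linesearch_label explicit_methods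
instance (entries : List (List (String × String))) (linesearch_label : String) (explicit_methods : List String) (out : List String) : Decidable (Spec_collect_body_methods entries linesearch_label explicit_methods out) := by unfold Spec_collect_body_methods; infer_instance

-- ===== CLAIM (what is proved, stated in full; the proofs are below) =====
def Claim_equal_collect_body_methods : Prop := ∀ (entries : List (List (String × String))) (linesearch_label : String) (explicit_methods : List String), Dom_collect_body_methods entries linesearch_label explicit_methods → Pre_collect_body_methods entries linesearch_label explicit_methods → Spec_collect_body_methods entries linesearch_label explicit_methods (collect_body_methods entries linesearch_label explicit_methods)

-- ===== LEMMAS AND PROOFS =====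

-- proof-side abbreviations for A's sort key and the comparison sorted2 uses
def pvPref : List String := ["cosine", "muon", "schedulefree_adam"]
def pvK1 (m : String) : Nat := if pvPref.contains m then (PySem.List.index? pvPref m).getD 3 else 3
def pvBefore (a b : String) : Bool := decide (pvK1 a < pvK1 b) || (!decide (pvK1 b < pvK1 a) && decide (a < b))
def pvLe (a b : String) : Prop := pvBefore b a = false

lemma pvLe_iff (a b : String) : pvLe a b ↔ (pvK1 a < pvK1 b ∨ (pvK1 a = pvK1 b ∧ a ≤ b)) := by
  simp only [pvLe, pvBefore, Bool.or_eq_false_iff, Bool.and_eq_false_iff,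
    Bool.not_eq_false', decide_eq_false_iff_not, decide_eq_true_eq, not_lt]
  constructor
  · rintro ⟨h1, h2 | h2⟩
    · omega
    · rcases lt_or_ge (pvK1 a) (pvK1 b) with h | h
      · exact Or.inl h
      · exact Or.inr ⟨le_antisymm h1 h, h2⟩
  · rintro (h | ⟨h1, h2⟩)
    · exact ⟨le_of_lt h, Or.inl h⟩
    · exact ⟨le_of_eq h1, Or.inr h2⟩

lemma pvLe_trans {a b c : String} (h1 : pvLe a b) (h2 : pvLe b c) : pvLe a c := by
  rw [pvLe_iff] at *
  rcases h1 with h1 | ⟨h1, h1'⟩ <;> rcases h2 with h2 | ⟨h2, h2'⟩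
  · exact Or.inl (h1.trans h2)
  · exact Or.inl (h2 ▸ h1)
  · exact Or.inl (h1 ▸ h2)
  · exact Or.inr ⟨h1.trans h2, h1'.trans h2'⟩

lemma pvLe_antisymm {a b : String} (h1 : pvLe a b) (h2 : pvLe b a) : a = b := by
  rw [pvLe_iff] at *
  rcases h1 with h1 | ⟨he1, h1'⟩ <;> rcases h2 with h2 | ⟨he2, h2'⟩
  · omega
  · omega
  · omega
  · exact le_antisymm h1' h2'

lemma pvLe_of_before {a b : String} (h : pvBefore a b = true) : pvLe a b := by
  rw [pvLe_iff]
  simp only [pvBefore, Bool.or_eq_true, Bool.and_eq_true, Bool.not_eq_eq_eq_not, Bool.not_true,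
    decide_eq_true_eq, decide_eq_false_iff_not, not_lt] at h
  rcases h with h | ⟨h1, h2⟩
  · exact Or.inl h
  · rcases lt_or_ge (pvK1 a) (pvK1 b) with h | h
    · exact Or.inl h
    · exact Or.inr ⟨by omega, le_of_lt h2⟩

lemma pvLe_of_not_before {a b : String} (h : pvBefore b a = false) : pvLe a b := h

lemma pv_insertBy_pairwise (x : String) : ∀ ys : List String, List.Pairwise pvLe ys →
    List.Pairwise pvLe (PySem.List.insertBy pvBefore x ys) := by
  intro ys
  induction ys with
  | nil => intro _; simp [PySem.List.insertBy]
  | cons y ys ih =>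
    intro hp
    rw [List.pairwise_cons] at hp
    by_cases hb : pvBefore x y = true
    · simp only [PySem.List.insertBy, hb, if_pos]
      refine List.pairwise_cons.2 ⟨?_, List.pairwise_cons.2 hp⟩
      intro z hz
      rcases List.mem_cons.1 hz with rfl | hz
      · exact pvLe_of_before hb
      · exact pvLe_trans (pvLe_of_before hb) (hp.1 z hz)
    · simp only [PySem.List.insertBy, hb, if_neg, Bool.false_eq_true, not_false_iff]
      refine List.pairwise_cons.2 ⟨?_, ih hp.2⟩
      intro z hz
      rcases (PySem.List.mem_insertBy pvBefore x z ys).1 hz with rfl | hz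
      · exact pvLe_of_not_before (Bool.eq_false_iff.2 hb)
      · exact hp.1 z hz

lemma pv_foldl_insertBy_pairwise (xs : List String) :
    ∀ acc : List String, List.Pairwise pvLe acc →
    List.Pairwise pvLe (xs.foldl (fun acc x => PySem.List.insertBy pvBefore x acc) acc) := by
  induction xs with
  | nil => intro acc h; simpa using h
  | cons x xs ih =>
    intro acc h
    exact ih _ (pv_insertBy_pairwise x acc h)

lemma pv_sorted2_pairwise (xs : List String) :
    List.Pairwise pvLe (PySem.List.sorted2 xs (fun m => pvK1 m) (fun m => m) false) := by
  have : PySem.List.sorted2 xs (fun m => pvK1 m) (fun m => m) false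
      = xs.foldl (fun acc x => PySem.List.insertBy pvBefore x acc) [] := rfl
  rw [this]
  exact pv_foldl_insertBy_pairwise xs [] (by simp)

-- membership and nodup of A's dedup fold
def pvGet (e : List (String × String)) : String := ((PySem.Dict.mk e).get? "method").getD ""

lemma pv_fold_mem (ll : String) (entries : List (List (String × String))) :
    ∀ acc : List String, ∀ x,
      (x ∈ entries.foldl (fun ms e =>
        if pvGet e == ll then ms
        else if ms.contains (pvGet e) then ms
        else ms ++ [pvGet e]) acc)
      ↔ (x ∈ acc ∨ ((∃ e ∈ entries, x = pvGet e) ∧ x ≠ ll)) := by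
  induction entries with
  | nil => intro acc x; simp
  | cons e es ih =>
    intro acc x
    simp only [List.foldl_cons]
    by_cases h1 : pvGet e == ll
    · rw [if_pos h1, ih]
      simp only [List.mem_cons]
      constructor
      · rintro (h | ⟨⟨f, hf, rfl⟩, hne⟩)
        · exact Or.inl h
        · exact Or.inr ⟨⟨f, Or.inr hf, rfl⟩, hne⟩
      · rintro (h | ⟨⟨f, hf | hf, rfl⟩, hne⟩)
        · exact Or.inl h
        · exact absurd (eq_of_beq h1) (hf ▸ hne)
        · exact Or.inr ⟨⟨f, hf, rfl⟩, hne⟩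
    · rw [if_neg h1]
      have hne : pvGet e ≠ ll := by simpa using h1
      by_cases h2 : acc.contains (pvGet e)
      · rw [if_pos h2, ih]
        have hmem : pvGet e ∈ acc := by simpa using h2
        simp only [List.mem_cons]
        constructor
        · rintro (h | ⟨⟨f, hf, rfl⟩, hx⟩)
          · exact Or.inl h
          · exact Or.inr ⟨⟨f, Or.inr hf, rfl⟩, hx⟩
        · rintro (h | ⟨⟨f, hf | hf, rfl⟩, hx⟩)
          · exact Or.inl h
          · exact Or.inl (by rw [hf]; exact hmem)
          · exact Or.inr ⟨⟨f, hf, rfl⟩, hx⟩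
      · rw [if_neg h2, ih]
        simp only [List.mem_append, List.mem_cons, List.not_mem_nil, or_false]
        constructor
        · rintro ((h | rfl) | ⟨⟨f, hf, rfl⟩, hx⟩)
          · exact Or.inl h
          · exact Or.inr ⟨⟨e, Or.inl rfl, rfl⟩, hne⟩
          · exact Or.inr ⟨⟨f, Or.inr hf, rfl⟩, hx⟩
        · rintro (h | ⟨⟨f, hf | hf, rfl⟩, hx⟩)
          · exact Or.inl (Or.inl h)
          · exact Or.inl (Or.inr (by rw [hf]))
          · exact Or.inr ⟨⟨f, hf, rfl⟩, hx⟩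

lemma pv_fold_nodup (ll : String) (entries : List (List (String × String))) :
    ∀ acc : List String, acc.Nodup →
      (entries.foldl (fun ms e =>
        if pvGet e == ll then ms
        else if ms.contains (pvGet e) then ms
        else ms ++ [pvGet e]) acc).Nodup := by
  induction entries with
  | nil => intro acc h; simpa using h
  | cons e es ih =>
    intro acc h
    simp only [List.foldl_cons]
    split
    · exact ih _ h
    · split
      · exact ih _ h
      · refine ih _ ?_
        rename_i h2
        refine h.append (List.nodup_singleton _) ?_
        rw [List.disjoint_singleton]
        simpa using h2

lemma pvK1_of_mem_pref {a : String} (h : a ∈ pvPref) : pvK1 a < 3 := by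
  fin_cases h <;> decide

lemma pvK1_of_not_mem_pref {a : String} (h : ¬ a ∈ pvPref) : pvK1 a = 3 := by
  simp [pvK1, h]

-- the core identity: A's keyed sort of a dedup list ms equals B's staged output over any
-- nodup list seen with the same members
lemma pv_main (ms seen : List String) (hndm : ms.Nodup) (hnds : seen.Nodup)
    (hmem : ∀ x, x ∈ ms ↔ x ∈ seen) :
    PySem.List.sorted2 ms
        (fun method => if pvPref.contains method then (PySem.List.index? pvPref method).getD 3 else 3)
        (fun method => method) false
      = pvPref.filter (fun p => PySem.Set.contains seen p) ++
          PySem.List.sorted (PySem.Set.diff seen (PySem.Set.ofList pvPref)) (fun m => m) false := by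
  have hkey : (fun method => if pvPref.contains method then (PySem.List.index? pvPref method).getD 3 else 3) = pvK1 := rfl
  rw [hkey]
  have hnp : pvPref.Nodup := by decide
  have hperm : ms.Perm seen := (List.perm_ext_iff_of_nodup hndm hnds).2 hmem
  -- the right-hand side is a permutation of ms
  have perm1 : (pvPref.filter (fun p => PySem.Set.contains seen p)).Perm
      (ms.filter (fun m => pvPref.contains m)) := by
    refine (List.perm_ext_iff_of_nodup (hnp.filter _) (hndm.filter _)).2 ?_
    intro a
    simp only [List.mem_filter, PySem.Set.contains, List.contains_iff_mem, hmem]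
    exact ⟨fun ⟨h1, h2⟩ => ⟨by simpa [hmem] using h2, by simpa using h1⟩,
           fun ⟨h1, h2⟩ => ⟨by simpa using h2, by simpa [hmem] using h1⟩⟩
  have perm2 : (PySem.List.sorted (PySem.Set.diff seen (PySem.Set.ofList pvPref)) (fun m => m) false).Perm
      (ms.filter (fun m => !pvPref.contains m)) := by
    refine ((PySem.List.sorted_perm _ _ _).trans ?_)
    refine (List.perm_ext_iff_of_nodup (PySem.Set.nodup_diff _ _ hnds) (hndm.filter _)).2 ?_
    intro a
    rw [PySem.Set.mem_diff, List.mem_filter, hmem a]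
    simp [PySem.Set.mem_ofList]
  have permR : (pvPref.filter (fun p => PySem.Set.contains seen p) ++
      PySem.List.sorted (PySem.Set.diff seen (PySem.Set.ofList pvPref)) (fun m => m) false).Perm ms :=
    (perm1.append perm2).trans (List.filter_append_perm (fun m => pvPref.contains m) ms)
  -- both sides are pvLe-pairwise
  have hp1 : List.Pairwise pvLe (pvPref.filter (fun p => PySem.Set.contains seen p)) :=
    List.Pairwise.filter _ (show List.Pairwise (fun a b => pvBefore b a = false) pvPref by decide)
  have hp2 : List.Pairwise pvLe
      (PySem.List.sorted (PySem.Set.diff seen (PySem.Set.ofList pvPref)) (fun m => m) false) := by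
    refine List.Pairwise.imp_of_mem ?_ (PySem.List.sorted_pairwise _ (fun m => m))
    intro a b ha hb hle
    rw [PySem.List.mem_sorted] at ha hb
    have hna : ¬ a ∈ pvPref := by
      have := ((PySem.Set.mem_diff _ _ _).1 ha).2; simpa [PySem.Set.mem_ofList] using this
    have hnb : ¬ b ∈ pvPref := by
      have := ((PySem.Set.mem_diff _ _ _).1 hb).2; simpa [PySem.Set.mem_ofList] using this
    exact (pvLe_iff a b).2 (Or.inr ⟨by rw [pvK1_of_not_mem_pref hna, pvK1_of_not_mem_pref hnb], hle⟩)
  have hcross : ∀ a ∈ pvPref.filter (fun p => PySem.Set.contains seen p),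
      ∀ b ∈ PySem.List.sorted (PySem.Set.diff seen (PySem.Set.ofList pvPref)) (fun m => m) false,
      pvLe a b := by
    intro a ha b hb
    have hma : a ∈ pvPref := (List.mem_filter.1 ha).1
    rw [PySem.List.mem_sorted] at hb
    have hnb : ¬ b ∈ pvPref := by
      have := ((PySem.Set.mem_diff _ _ _).1 hb).2; simpa [PySem.Set.mem_ofList] using this
    exact (pvLe_iff a b).2 (Or.inl (by rw [pvK1_of_not_mem_pref hnb]; exact pvK1_of_mem_pref hma))
  refine List.Perm.eq_of_pairwise (fun a b _ _ h1 h2 => pvLe_antisymm h1 h2)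
    (pv_sorted2_pairwise ms) (List.pairwise_append.2 ⟨hp1, hp2, hcross⟩)
    ((PySem.List.sorted2_perm ms pvK1 (fun m => m) false).trans permR.symm)

-- ===== VERDICT (by name: the statement is the Claim_ definition above) =====
theorem collect_body_methods_spec : Claim_equal_collect_body_methods := by
  intro entries ll ems _ _
  unfold Spec_collect_body_methods collect_body_methods collect_body_methods_alt
  match ems with
  | _ :: _ => simp
  | [] =>
    simp only [ne_eq, not_true_eq_false, not_false_eq_true, if_neg]
    refine pv_main _ _ (pv_fold_nodup ll entries [] (by simp)) ?_ ?_
    · exact PySem.Set.nodup_diff _ _ (PySem.Set.nodup_ofList _)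
    · intro x
      have h := pv_fold_mem ll entries [] x
      simp only [List.not_mem_nil, false_or] at h
      refine h.trans ?_
      rw [PySem.Set.mem_diff]
      simp only [PySem.Set.mem_ofList, List.mem_map, List.mem_singleton]
      constructor
      · rintro ⟨⟨e, he, rfl⟩, hne⟩
        exact ⟨⟨e, he, rfl⟩, hne⟩
      · rintro ⟨⟨e, he, rfl⟩, hne⟩
        exact ⟨⟨e, he, rfl⟩, hne⟩
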